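-- pv_equiv track=rewrite | github.com/sovyx-ai/sovyx | src/sovyx/upgrade/vault_import/_tags.py | expand_nested
-- ===== SOURCE A (Python) =====
-- def expand_nested(tag_name: str) -> tuple[str, ...]:
--     """Expand ``"project/alpha/beta"`` into ``("project", "project/alpha", "project/alpha/beta")``.
--
--     Used by the encoder to emit one Concept per hierarchy level and
--     connect them via ``PART_OF`` relations. A flat tag like
--     ``"linguistics"`` yields a one-element tuple.
--     """
--     parts = [p for p in tag_name.split("/") if p]
--     if not parts:
--         return ()
--     out: list[str] = []
--     acc = ""
--     for part in parts:
--         acc = part if not acc else f"{acc}/{part}"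
--         out.append(acc)
--     return tuple(out)
-- ===== SOURCE B (Python) =====
-- def expand_nested(tag_name: str) -> tuple[str, ...]:
--     parts = [p for p in tag_name.split("/") if p]
--     return tuple("/".join(parts[:i + 1]) for i in range(len(parts)))
-- ===== Notes on version B (the rewrite author's own statement) =====
-- stated objective: simpler
-- what changed: Replaces the mutable running accumulator and explicit append loop by computing each hierarchy level independently as a join of a prefix slice of the parts list.
import Mathlib
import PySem

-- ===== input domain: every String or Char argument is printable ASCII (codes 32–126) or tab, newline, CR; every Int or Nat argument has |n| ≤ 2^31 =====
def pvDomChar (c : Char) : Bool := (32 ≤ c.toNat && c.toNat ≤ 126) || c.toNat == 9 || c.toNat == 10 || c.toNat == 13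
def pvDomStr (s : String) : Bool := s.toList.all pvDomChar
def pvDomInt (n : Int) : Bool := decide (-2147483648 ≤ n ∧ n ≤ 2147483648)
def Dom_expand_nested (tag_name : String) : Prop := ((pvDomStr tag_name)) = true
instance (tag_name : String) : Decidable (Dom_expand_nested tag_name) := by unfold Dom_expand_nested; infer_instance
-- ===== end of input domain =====

-- B replaces A's running accumulator with independent joins of prefix slices (simpler decomposition; speed unchanged).
-- ===== PORT A =====
-- loop 'for part in parts: acc = part if not acc else f"{acc}/{part}"; out.append(acc)'
-- (state = (out, acc); f-string concat is List Char append, exact on ASCII)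
def expandLoopA (parts : List (List Char)) (st : List String × List Char) : List String × List Char :=
  parts.foldl
    (fun st part =>
      let acc := if st.2 = [] then part else st.2 ++ ['/'] ++ part
      (st.1 ++ [String.ofList acc], acc)) st

def expand_nested (tag_name : String) : List String :=
  let parts := (PySem.Chars.splitOn tag_name.toList ['/']).filter (fun p => p ≠ [])
  if parts = [] then []
  else (expandLoopA parts ([], [])).1

-- ===== PORT B =====
def expand_nested_alt (tag_name : String) : List String :=
  let parts := (PySem.Chars.splitOn tag_name.toList ['/']).filter (fun p => p ≠ [])
  (PySem.List.pyRange 0 (parts.length : Int)).map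
    (fun i => String.ofList (PySem.Chars.join ['/'] (PySem.List.slice parts none (some (i + 1)))))

-- ===== PRECONDITION & SPEC =====
def Spec_expand_nested (tag_name : String) (out : List String) : Prop := out = expand_nested_alt tag_name
instance (tag_name : String) (out : List String) : Decidable (Spec_expand_nested tag_name out) := by unfold Spec_expand_nested; infer_instance

-- ===== CLAIM (what is proved, stated in full; the proofs are below) =====
def Claim_equal_expand_nested : Prop := ∀ (tag_name : String), Dom_expand_nested tag_name → Spec_expand_nested tag_name (expand_nested tag_name)

-- ===== LEMMAS AND PROOFS =====

theorem join_cons_of_ne_nil (sep q : List Char) (rest : List (List Char)) (h : rest ≠ []) :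
    PySem.Chars.join sep (q :: rest) = q ++ sep ++ PySem.Chars.join sep rest := by
  cases rest with
  | nil => exact absurd rfl h
  | cons r rs => exact PySem.Chars.join_cons_cons sep q r rs

theorem expandLoopA_eq (qs : List (List Char)) (out : List String) (acc : List Char) (h : acc ≠ []) :
    (expandLoopA qs (out, acc)).1 =
      out ++ (List.range qs.length).map
        (fun i => String.ofList (acc ++ ['/'] ++ PySem.Chars.join ['/'] (qs.take (i + 1)))) := by
  induction qs generalizing out acc with
  | nil => simp [expandLoopA]
  | cons q qs ih =>
    have hne : acc ++ ['/'] ++ q ≠ [] := by simp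
    have step : expandLoopA (q :: qs) (out, acc) =
        expandLoopA qs (out ++ [String.ofList (acc ++ ['/'] ++ q)], acc ++ ['/'] ++ q) := by
      simp [expandLoopA, h]
    rw [step, ih _ _ hne, List.length_cons, List.range_succ_eq_map]
    simp only [List.map_cons, List.map_map, List.append_assoc, List.singleton_append]
    congr 1
    congr 1
    · simp [PySem.Chars.join_singleton]
    · apply List.map_congr_left
      intro i hi
      have : qs.take (i + 1) ≠ [] := by
        have : 0 < qs.length := lt_of_le_of_lt (Nat.zero_le _) (List.mem_range.mp hi)
        cases qs with
        | nil => simp at this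
        | cons r rs => simp
      simp [Function.comp, Nat.succ_eq_add_one, join_cons_of_ne_nil ['/'] q _ this, List.append_assoc]

theorem main_eq (parts : List (List Char)) (h : ∀ p ∈ parts, p ≠ []) :
    (if parts = [] then [] else (expandLoopA parts ([], [])).1) =
      (PySem.List.pyRange 0 (parts.length : Int)).map
        (fun i => String.ofList (PySem.Chars.join ['/'] (PySem.List.slice parts none (some (i + 1))))) := by
  rw [PySem.List.pyRange_zero_natCast, List.map_map]
  have hslice : ∀ k : Nat,
      PySem.List.slice parts none (some ((k : Int) + 1)) = parts.take (k + 1) := by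
    intro k
    have : ((k : Int) + 1) = ((k + 1 : Nat) : Int) := by push_cast; ring
    rw [this, PySem.List.slice_to_natCast]
  cases parts with
  | nil => simp
  | cons q qs =>
    have hq : q ≠ [] := h q (by simp)
    simp only [if_neg (by simp : q :: qs ≠ [])]
    have step : expandLoopA (q :: qs) (([], []) : List String × List Char) =
        expandLoopA qs ([String.ofList q], q) := by
      simp [expandLoopA]
    rw [step, expandLoopA_eq qs [String.ofList q] q hq, List.length_cons, List.range_succ_eq_map]
    simp only [List.map_cons, List.map_map, List.singleton_append]
    congr 1
    · show String.ofList q = String.ofList (PySem.Chars.join ['/'] (PySem.List.slice (q :: qs) none (some (((0:Nat):Int) + 1))))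
      rw [show (some (((0:Nat):Int) + 1)) = some (((1:Nat):Int)) by norm_num, PySem.List.slice_to_natCast]
      simp [PySem.Chars.join_singleton]
    · apply List.map_congr_left
      intro i hi
      have hne : qs.take (i + 1) ≠ [] := by
        have : 0 < qs.length := lt_of_le_of_lt (Nat.zero_le _) (List.mem_range.mp hi)
        cases qs with
        | nil => simp at this
        | cons r rs => simp
      have h2 : PySem.List.slice (q :: qs) none (some ((i : Int) + 1 + 1)) = q :: qs.take (i + 1) := by
        rw [show ((i : Int) + 1 + 1) = ((i + 2 : Nat) : Int) by push_cast; ring, PySem.List.slice_to_natCast]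
        simp
      simp [Function.comp, Nat.succ_eq_add_one, h2, join_cons_of_ne_nil ['/'] q _ hne, List.append_assoc]

-- ===== VERDICT (by name: the statement is the Claim_ definition above) =====
theorem expand_nested_spec : Claim_equal_expand_nested := by
  intro t _
  unfold Spec_expand_nested expand_nested expand_nested_alt
  exact main_eq _ (by intro p hp; exact of_decide_eq_true (List.mem_filter.mp hp).2)
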